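-- pv_equiv track=rewrite | github.com/lcomment/codynators-backend | app/algorithm_2.py | save_xlsx_value
-- ===== SOURCE A (Python) =====
-- def save_xlsx_value(x, y, z):
--     values = []
--     for i in range(1, 9):
--         if i == int(x) or i == int(y) or i == int(z):
--             values.append(1)
--         else:
--             values.append(0)
--     return values
-- ===== SOURCE B (Python) =====
-- def save_xlsx_value(x, y, z):
--     values = [0] * 8
--     for v in (x, y, z):
--         iv = int(v)
--         if 1 <= iv <= 8:
--             values[iv - 1] = 1
--     return values
-- ===== Notes on version B (the rewrite author's own statement) =====
-- stated objective: simpler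
-- what changed: B scatters each of the three values into a preallocated zero vector (one bounds-checked write per value) instead of scanning all 8 positions and testing each against all three values.
import Mathlib
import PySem

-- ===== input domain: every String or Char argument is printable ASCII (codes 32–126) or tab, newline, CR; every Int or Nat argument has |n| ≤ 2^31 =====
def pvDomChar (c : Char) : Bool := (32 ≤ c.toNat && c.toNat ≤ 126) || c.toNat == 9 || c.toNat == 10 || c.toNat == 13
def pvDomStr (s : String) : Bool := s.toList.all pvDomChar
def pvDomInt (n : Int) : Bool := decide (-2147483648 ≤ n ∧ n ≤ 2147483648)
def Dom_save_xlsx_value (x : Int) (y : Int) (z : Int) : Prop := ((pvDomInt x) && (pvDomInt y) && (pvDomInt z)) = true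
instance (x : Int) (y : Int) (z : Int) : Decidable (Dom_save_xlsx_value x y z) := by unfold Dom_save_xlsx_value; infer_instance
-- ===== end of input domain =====

-- B builds the 8-slot indicator by writing a 1 at each in-range value's slot
-- instead of scanning all 8 positions testing equality against all three values (simpler).

-- ===== PORT A =====
def save_xlsx_value (x : Int) (y : Int) (z : Int) : List Int :=
  (PySem.List.pyRange 1 9 1).foldl
    (fun values i => values ++ [if i == x || i == y || i == z then (1 : Int) else 0]) []

-- ===== PORT B =====
def pvScatter (values : List Int) (v : Int) : List Int :=
  if 1 ≤ v ∧ v ≤ 8 then values.set (v - 1).toNat 1 else values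

def save_xlsx_value_alt (x : Int) (y : Int) (z : Int) : List Int :=
  [x, y, z].foldl pvScatter [0, 0, 0, 0, 0, 0, 0, 0]

-- ===== PRECONDITION & SPEC =====
def Spec_save_xlsx_value (x : Int) (y : Int) (z : Int) (out : List Int) : Prop := out = save_xlsx_value_alt x y z
instance (x : Int) (y : Int) (z : Int) (out : List Int) : Decidable (Spec_save_xlsx_value x y z out) := by unfold Spec_save_xlsx_value; infer_instance

-- ===== CLAIM (what is proved, stated in full; the proofs are below) =====
def Claim_equal_save_xlsx_value : Prop := ∀ (x : Int) (y : Int) (z : Int), Dom_save_xlsx_value x y z → Spec_save_xlsx_value x y z (save_xlsx_value x y z)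

-- ===== LEMMAS AND PROOFS =====

theorem pvScatter_length (vals : List Int) (v : Int) :
    (pvScatter vals v).length = vals.length := by
  unfold pvScatter; split_ifs <;> simp

theorem pvScatter_get? (vals : List Int) (v : Int) (k : Nat)
    (h8 : vals.length = 8) (hk : k < 8) :
    (pvScatter vals v)[k]? = if v = (k : Int) + 1 then some 1 else vals[k]? := by
  by_cases h : 1 ≤ v ∧ v ≤ 8
  · by_cases hv : v = (k : Int) + 1
    · have hidx : (v - 1).toNat = k := by omega
      simp [pvScatter, hv, h8, hk]
    · have hidx : (v - 1).toNat ≠ k := by omega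
      simp only [pvScatter, if_pos h, if_neg hv]
      exact List.getElem?_set_ne hidx
  · have hv : v ≠ (k : Int) + 1 := by omega
    simp [pvScatter, h, hv]

theorem save_xlsx_value_eval (x y z : Int) :
    save_xlsx_value x y z =
      [if (1:Int) = x ∨ 1 = y ∨ 1 = z then 1 else 0,
       if (2:Int) = x ∨ 2 = y ∨ 2 = z then 1 else 0,
       if (3:Int) = x ∨ 3 = y ∨ 3 = z then 1 else 0,
       if (4:Int) = x ∨ 4 = y ∨ 4 = z then 1 else 0,
       if (5:Int) = x ∨ 5 = y ∨ 5 = z then 1 else 0,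
       if (6:Int) = x ∨ 6 = y ∨ 6 = z then 1 else 0,
       if (7:Int) = x ∨ 7 = y ∨ 7 = z then 1 else 0,
       if (8:Int) = x ∨ 8 = y ∨ 8 = z then 1 else 0] := by
  have hr : PySem.List.pyRange 1 9 1 = [1, 2, 3, 4, 5, 6, 7, 8] := by decide
  simp [save_xlsx_value, hr, List.foldl, or_assoc]

theorem save_xlsx_value_alt_length (x y z : Int) :
    (save_xlsx_value_alt x y z).length = 8 := by
  simp [save_xlsx_value_alt, List.foldl, pvScatter_length]

theorem save_xlsx_value_alt_get? (x y z : Int) (k : Nat) (hk : k < 8) :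
    (save_xlsx_value_alt x y z)[k]? =
      some (if x = (k : Int) + 1 ∨ y = (k : Int) + 1 ∨ z = (k : Int) + 1 then 1 else 0) := by
  have l0 : ([0, 0, 0, 0, 0, 0, 0, 0] : List Int).length = 8 := by decide
  have l1 : (pvScatter [0, 0, 0, 0, 0, 0, 0, 0] x).length = 8 := by
    rw [pvScatter_length]; exact l0
  have l2 : (pvScatter (pvScatter [0, 0, 0, 0, 0, 0, 0, 0] x) y).length = 8 := by
    rw [pvScatter_length]; exact l1
  show (pvScatter (pvScatter (pvScatter [0, 0, 0, 0, 0, 0, 0, 0] x) y) z)[k]? = _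
  rw [pvScatter_get? _ z k l2 hk, pvScatter_get? _ y k l1 hk, pvScatter_get? _ x k l0 hk]
  have hbase : ([0, 0, 0, 0, 0, 0, 0, 0] : List Int)[k]? = some 0 := by
    interval_cases k <;> rfl
  rw [hbase]
  by_cases hx : x = (k : Int) + 1 <;> by_cases hy : y = (k : Int) + 1 <;>
    by_cases hz : z = (k : Int) + 1 <;> simp [hx, hy, hz]

-- ===== VERDICT (by name: the statement is the Claim_ definition above) =====
theorem save_xlsx_value_spec : Claim_equal_save_xlsx_value := by
  intro x y z _
  unfold Spec_save_xlsx_value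
  apply List.ext_getElem?
  intro k
  by_cases hk : k < 8
  · rw [save_xlsx_value_alt_get? x y z k hk, save_xlsx_value_eval]
    interval_cases k <;> simp <;> split_ifs <;> first | rfl | omega
  · rw [List.getElem?_eq_none (by rw [save_xlsx_value_eval]; simp; omega),
        List.getElem?_eq_none (by rw [save_xlsx_value_alt_length]; omega)]
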